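-- pv_equiv track=rewrite | github.com/ckoons/BubbleSpacetimeTheory | play/toy_334_ef_cycle_filling.py | compute_beta1_graph
-- ===== SOURCE A (Python) =====
-- def compute_beta1_graph(vertices, edges):
--     """Compute β₁ of a graph as a 1-complex (no filled triangles).
--     β₁ = |E| - |V| + components."""
--     if not vertices:
--         return 0
--     # Count connected components via union-find
--     parent = {v: v for v in vertices}
--     def find(x):
--         while parent[x] != x:
--             parent[x] = parent[parent[x]]
--             x = parent[x]
--         return x
--     def union(x, y):
--         px, py = find(x), find(y)
--         if px != py:
--             parent[px] = py
--             return True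
--         return False
--
--     components = len(vertices)
--     for u, v in edges:
--         if union(u, v):
--             components -= 1
--
--     return len(edges) - len(vertices) + components
-- ===== SOURCE B (Python) =====
-- def compute_beta1_graph(vertices, edges):
--     """Compute beta_1 = |E| - |V| + components via flat component labels
--     (label propagation) instead of union-find."""
--     if not vertices:
--         return 0
--     label = {v: v for v in vertices}
--     components = len(label)
--     for u, v in edges:
--         lu, lv = label[u], label[v]
--         if lu != lv:
--             for w in label:
--                 if label[w] == lu:
--                     label[w] = lv
--             components -= 1
--     return len(edges) - len(label) + components
-- ===== Notes on version B (the rewrite author's own statement) =====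
-- stated objective: alternative
-- what changed: Replaces the union-find forest (parent pointers, find with path compression, root linking) by a flat component-label dictionary: each edge compares the two endpoint labels and, when they differ, relabels the whole smaller-is-irrelevant class in one sweep; the component count over distinct vertices replaces the duplicate-counting arithmetic.
import Mathlib
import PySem

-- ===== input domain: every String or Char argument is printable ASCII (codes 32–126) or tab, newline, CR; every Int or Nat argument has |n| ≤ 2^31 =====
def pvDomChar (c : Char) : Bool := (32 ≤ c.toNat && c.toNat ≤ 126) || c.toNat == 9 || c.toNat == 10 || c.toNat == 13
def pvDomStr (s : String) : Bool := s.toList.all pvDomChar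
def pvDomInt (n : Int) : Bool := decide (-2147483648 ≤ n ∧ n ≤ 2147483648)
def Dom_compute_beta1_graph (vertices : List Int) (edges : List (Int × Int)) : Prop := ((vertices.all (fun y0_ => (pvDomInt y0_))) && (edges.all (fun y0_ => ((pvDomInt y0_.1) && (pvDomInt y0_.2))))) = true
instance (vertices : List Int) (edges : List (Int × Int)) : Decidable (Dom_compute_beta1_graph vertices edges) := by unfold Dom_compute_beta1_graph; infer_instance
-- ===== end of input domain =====

-- B replaces A's union-find (parent forest, find with path compression) by a flat
-- component-label dictionary with whole-class relabelling per merging edge (alternative).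

-- ===== PORT A =====
-- while parent[x] != x: parent[x] = parent[parent[x]]; x = parent[x]
-- fuel makes the while-loop total; under Pre_ the parent map is a rooted forest, so
-- vertices.length + 1 steps provably suffice (chain nodes are distinct keys).
def pvFind (fuel : Nat) (parent : PySem.Dict Int Int) (x : Int) :
    Option (Int × PySem.Dict Int Int) :=
  match fuel with
  | 0 => none
  | fuel' + 1 =>
    match parent.get? x with
    | none => none                    -- KeyError
    | some px =>
      if px = x then some (x, parent)
      else
        match parent.get? px with
        | none => none                -- KeyError
        | some ppx => pvFind fuel' (parent.insert x ppx) ppx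

-- px, py = find(x), find(y); if px != py: parent[px] = py; return True else False
def pvUnion (fuel : Nat) (parent : PySem.Dict Int Int) (x y : Int) :
    Option (Bool × PySem.Dict Int Int) :=
  (pvFind fuel parent x).bind fun pxp =>
    (pvFind fuel pxp.2 y).map fun pyp =>
      if pxp.1 ≠ pyp.1 then (true, pyp.2.insert pxp.1 pyp.1) else (false, pyp.2)

def compute_beta1_graph (vertices : List Int) (edges : List (Int × Int)) : Int :=
  if vertices = [] then 0
  else
    let parent := vertices.foldl (fun d v => d.insert v v) PySem.Dict.empty
    let fuel := vertices.length + 1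
    let st := edges.foldl
      (fun st e => st.bind fun pc =>
        (pvUnion fuel pc.1 e.1 e.2).map fun bu =>
          (bu.2, if bu.1 then pc.2 - 1 else pc.2))
      (some (parent, (vertices.length : Int)))
    match st with
    | none => 0                       -- KeyError; unreachable under Pre_
    | some pc => (edges.length : Int) - (vertices.length : Int) + pc.2

-- ===== PORT B =====
-- for w in label: if label[w] == lu: label[w] = lv   (keys are unchanged by the loop)
def pvRelabel (label : PySem.Dict Int Int) (lu lv : Int) : PySem.Dict Int Int :=
  label.keys.foldl (fun d w => if d.get? w = some lu then d.insert w lv else d) label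

def compute_beta1_graph_alt (vertices : List Int) (edges : List (Int × Int)) : Int :=
  if vertices = [] then 0
  else
    let label := vertices.foldl (fun d v => d.insert v v) PySem.Dict.empty
    let st := edges.foldl
      (fun (st : PySem.Dict Int Int × Int) e =>
        match st.1.get? e.1, st.1.get? e.2 with
        | some lu, some lv =>
          if lu ≠ lv then (pvRelabel st.1 lu lv, st.2 - 1) else st
        | _, _ => st                  -- KeyError in Python; unreachable under Pre_
      )
      (label, (label.size : Int))
    (edges.length : Int) - (st.1.size : Int) + st.2

-- ===== PRECONDITION & SPEC =====
-- Pre_ excludes exactly the inputs where A raises KeyError: a nonempty vertex list with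
-- an edge endpoint that is not a vertex (B raises KeyError there too).
def Pre_compute_beta1_graph (vertices : List Int) (edges : List (Int × Int)) : Prop :=
  vertices = [] ∨ ∀ e ∈ edges, e.1 ∈ vertices ∧ e.2 ∈ vertices
instance (vertices : List Int) (edges : List (Int × Int)) : Decidable (Pre_compute_beta1_graph vertices edges) := by unfold Pre_compute_beta1_graph; infer_instance

def pvWitness_compute_beta1_graph : List Int × (List (Int × Int)) :=
  ([1, 2, 3, 4], [(1, 2), (2, 3), (1, 3)])

def Spec_compute_beta1_graph (vertices : List Int) (edges : List (Int × Int)) (out : Int) : Prop := out = compute_beta1_graph_alt vertices edges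
instance (vertices : List Int) (edges : List (Int × Int)) (out : Int) : Decidable (Spec_compute_beta1_graph vertices edges out) := by unfold Spec_compute_beta1_graph; infer_instance

-- ===== CLAIM (what is proved, stated in full; the proofs are below) =====
def Claim_equal_compute_beta1_graph : Prop := ∀ (vertices : List Int) (edges : List (Int × Int)), Dom_compute_beta1_graph vertices edges → Pre_compute_beta1_graph vertices edges → Spec_compute_beta1_graph vertices edges (compute_beta1_graph vertices edges)

-- ===== LEMMAS AND PROOFS =====

-- pvR parent ρ x n: following parent pointers from x reaches the fixpoint ρ x in
-- exactly n steps, with ρ constant along the chain.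
def pvR (parent : PySem.Dict Int Int) (ρ : Int → Int) : Int → Nat → Prop
  | x, 0 => parent.get? x = some x ∧ ρ x = x
  | x, n + 1 => ∃ p, parent.get? x = some p ∧ p ≠ x ∧ ρ p = ρ x ∧ pvR parent ρ p n

-- A-side invariant: keys are exactly V and every key's chain reaches its root.
def pvInv (V : List Int) (parent : PySem.Dict Int Int) (ρ : Int → Int) : Prop :=
  (∀ x, (parent.get? x).isSome ↔ x ∈ V) ∧ (∀ x ∈ V, ∃ n, pvR parent ρ x n)

lemma pvR_unique (parent : PySem.Dict Int Int) (ρ : Int → Int) :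
    ∀ n m x, pvR parent ρ x n → pvR parent ρ x m → n = m := by
  intro n
  induction n with
  | zero =>
    intro m x h1 h2
    cases m with
    | zero => rfl
    | succ m =>
      obtain ⟨hx, _⟩ := h1
      obtain ⟨p, hp, hne, _, _⟩ := h2
      rw [hx] at hp; cases hp; exact absurd rfl hne
  | succ n ih =>
    intro m x h1 h2
    cases m with
    | zero =>
      obtain ⟨hx, _⟩ := h2
      obtain ⟨p, hp, hne, _, _⟩ := h1
      rw [hx] at hp; cases hp; exact absurd rfl hne
    | succ m =>
      obtain ⟨p, hp, _, _, h1'⟩ := h1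
      obtain ⟨q, hq, _, _, h2'⟩ := h2
      rw [hp] at hq; cases hq
      exact congrArg Nat.succ (ih m p h1' h2')

lemma pvR_mem (V : List Int) (parent : PySem.Dict Int Int) (ρ : Int → Int)
    (hK : ∀ x, (parent.get? x).isSome ↔ x ∈ V) :
    ∀ n x, pvR parent ρ x n → x ∈ V := by
  intro n x h
  cases n with
  | zero => exact (hK x).mp (by rw [h.1]; rfl)
  | succ n => obtain ⟨p, hp, _⟩ := h; exact (hK x).mp (by rw [hp]; rfl)

lemma pvR_root (parent : PySem.Dict Int Int) (ρ : Int → Int) :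
    ∀ n x, pvR parent ρ x n → pvR parent ρ (ρ x) 0 := by
  intro n
  induction n with
  | zero => intro x h; rw [h.2]; exact h
  | succ n ih =>
    intro x h
    obtain ⟨p, _, _, hρ, h'⟩ := h
    rw [← hρ]; exact ih p h'

-- the chain from x visits pairwise distinct keys, so its length is < |V|
lemma pvR_list (parent : PySem.Dict Int Int) (ρ : Int → Int) :
    ∀ n x, pvR parent ρ x n →
      ∃ l : List Int, l.length = n + 1 ∧ l.Nodup ∧ ∀ y ∈ l, ∃ m ≤ n, pvR parent ρ y m := by
  intro n
  induction n with
  | zero =>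
    intro x h
    exact ⟨[x], rfl, List.nodup_singleton x, by
      intro y hy; rw [List.mem_singleton] at hy; exact ⟨0, le_refl 0, hy ▸ h⟩⟩
  | succ n ih =>
    intro x h
    obtain ⟨p, hp, hne, hρ, h'⟩ := h
    obtain ⟨l, hlen, hnd, hmem⟩ := ih p h'
    refine ⟨x :: l, by simp [hlen], ?_, ?_⟩
    · refine List.nodup_cons.mpr ⟨?_, hnd⟩
      intro hx
      obtain ⟨m, hm, hRm⟩ := hmem x hx
      have := pvR_unique parent ρ (n + 1) m x ⟨p, hp, hne, hρ, h'⟩ hRm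
      omega
    · intro y hy
      rcases List.mem_cons.mp hy with rfl | hy'
      · exact ⟨n + 1, le_refl _, ⟨p, hp, hne, hρ, h'⟩⟩
      · obtain ⟨m, hm, hRm⟩ := hmem y hy'
        exact ⟨m, Nat.le_succ_of_le hm, hRm⟩

lemma pvR_bound (V : List Int) (parent : PySem.Dict Int Int) (ρ : Int → Int)
    (hK : ∀ x, (parent.get? x).isSome ↔ x ∈ V)
    (n : Nat) (x : Int) (h : pvR parent ρ x n) : n < V.length := by
  obtain ⟨l, hlen, hnd, hmem⟩ := pvR_list parent ρ n x h
  have hsub : l ⊆ V := by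
    intro y hy
    obtain ⟨m, _, hRm⟩ := hmem y hy
    exact pvR_mem V parent ρ hK m y hRm
  have : l.length ≤ V.length := by
    calc l.length = l.toFinset.card := (List.toFinset_card_of_nodup hnd).symm
      _ ≤ V.toFinset.card := Finset.card_le_card (by intro a ha; simp at ha ⊢; exact hsub ha)
      _ ≤ V.length := V.toFinset_card_le
  omega

-- one path-compression write preserves every chain (same ρ), never lengthening it
lemma pvR_compress (parent : PySem.Dict Int Int) (ρ : Int → Int) (x px ppx : Int)
    (hx : parent.get? x = some px) (hne : px ≠ x) (hpx : parent.get? px = some ppx) :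
    ∀ n y, pvR parent ρ y n → ∃ n' ≤ n, pvR (parent.insert x ppx) ρ y n' := by
  intro n
  induction n using Nat.strong_induction_on with
  | _ n ih =>
    intro y h
    match n, h with
    | 0, h =>
      obtain ⟨h1, h2⟩ := h
      have hyx : y ≠ x := by
        intro he; rw [he, hx] at h1; exact hne (Option.some.inj h1)
      exact ⟨0, le_refl 0, ⟨by rw [PySem.Dict.get?_insert_of_ne _ _ hyx]; exact h1, h2⟩⟩
    | n + 1, h =>
      obtain ⟨p, hp, hpne, hρ, h'⟩ := h
      by_cases hyx : y = x
      · have hppx : px = p := by rw [hyx, hx] at hp; exact Option.some.inj hp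
        subst hppx
        have hpy : parent.get? y = some px := by rw [hyx]; exact hx
        match n, h' with
        | 0, h' =>
          obtain ⟨ha, hb⟩ := h'
          have he : ppx = px := by rw [ha] at hpx; exact (Option.some.inj hpx).symm
          refine ⟨1, le_refl 1, ⟨ppx, ?_, he ▸ hpne, he ▸ hρ, ?_, he ▸ hb⟩⟩
          · rw [hyx]; exact PySem.Dict.get?_insert_self _ _ _
          · rw [PySem.Dict.get?_insert_of_ne]
            · rw [he]; exact ha
            · rw [he, ← hyx]; exact hpne
        | m + 1, h' =>
          obtain ⟨q, hq, hqne, hqρ, h''⟩ := h'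
          have he : q = ppx := by rw [hq] at hpx; exact Option.some.inj hpx
          subst he
          have hqy : q ≠ y := by
            intro he2
            have := pvR_unique parent ρ m (m + 1 + 1) y (he2 ▸ h'')
              ⟨px, hpy, hpne, hρ, ⟨q, hq, hqne, hqρ, h''⟩⟩
            omega
          obtain ⟨m', hm', hR'⟩ := ih m (by omega) q h''
          refine ⟨m' + 1, by omega, ⟨q, ?_, hqy, ?_, hR'⟩⟩
          · rw [hyx]; exact PySem.Dict.get?_insert_self _ _ _
          · rw [hqρ, hρ]
      · obtain ⟨n', hn', hR'⟩ := ih n (by omega) p h'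
        exact ⟨n' + 1, by omega, ⟨p, by rw [PySem.Dict.get?_insert_of_ne _ _ hyx]; exact hp, hpne, hρ, hR'⟩⟩

-- find returns the root ρ x and preserves the invariant
lemma pvFind_spec (V : List Int) (ρ : Int → Int) :
    ∀ n parent x fuel, pvInv V parent ρ → pvR parent ρ x n → n < fuel →
      ∃ parent', pvFind fuel parent x = some (ρ x, parent') ∧ pvInv V parent' ρ := by
  intro n
  induction n using Nat.strong_induction_on with
  | _ n ih =>
    intro parent x fuel hInv hR hfuel
    obtain ⟨f, rfl⟩ : ∃ f, fuel = f + 1 := ⟨fuel - 1, by omega⟩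
    match n, hR with
    | 0, hR =>
      obtain ⟨h1, h2⟩ := hR
      refine ⟨parent, ?_, hInv⟩
      simp only [pvFind]
      rw [h1]
      simp [h2]
    | n + 1, hR =>
      obtain ⟨p, hp, hpne, hρ, h'⟩ := hR
      obtain ⟨pp, k, hpp, hρpp, hRpp, hk⟩ :
          ∃ pp k, parent.get? p = some pp ∧ ρ pp = ρ x ∧ pvR parent ρ pp k ∧ k ≤ n := by
        match n, h' with
        | 0, h' => exact ⟨p, 0, h'.1, hρ, h', le_refl 0⟩
        | m + 1, h' =>
          obtain ⟨q, hq, hqne, hqρ, h''⟩ := h'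
          exact ⟨q, m, hq, by rw [hqρ, hρ], h'', by omega⟩
      have hxS : x ∈ V := (hInv.1 x).mp (by rw [hp]; rfl)
      have hInv1 : pvInv V (parent.insert x pp) ρ := by
        constructor
        · intro z
          by_cases hz : z = x
          · rw [hz, PySem.Dict.get?_insert_self]
            simpa using hxS
          · rw [PySem.Dict.get?_insert_of_ne _ _ hz]
            exact hInv.1 z
        · intro y hy
          obtain ⟨ny, hRy⟩ := hInv.2 y hy
          obtain ⟨n', _, h⟩ := pvR_compress parent ρ x p pp hp hpne hpp ny y hRy
          exact ⟨n', h⟩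
      obtain ⟨k', hk', hR'⟩ := pvR_compress parent ρ x p pp hp hpne hpp k pp hRpp
      obtain ⟨parent', heq, hInv'⟩ := ih k' (by omega) (parent.insert x pp) pp f hInv1 hR' (by omega)
      refine ⟨parent', ?_, hInv'⟩
      simp only [pvFind]
      simp [hp, hpp, hpne, heq, hρpp]

-- linking root pu under root pv shifts every chain of pu's class by one step
lemma pvR_link (parent : PySem.Dict Int Int) (ρ : Int → Int) (pu pv : Int)
    (hpu : pvR parent ρ pu 0) (hpv : pvR parent ρ pv 0) (hne : pu ≠ pv) :
    ∀ n y, pvR parent ρ y n →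
      pvR (parent.insert pu pv) (fun z => if ρ z = pu then pv else ρ z) y
        (if ρ y = pu then n + 1 else n) := by
  intro n
  induction n with
  | zero =>
    intro y h
    obtain ⟨h1, h2⟩ := h
    by_cases hy : ρ y = pu
    · have hyp : y = pu := by rw [← h2, hy]
      subst hyp
      rw [if_pos hy]
      have hc : ¬ (ρ pv = y) := by rw [hpv.2]; exact fun he => hne he.symm
      refine ⟨pv, PySem.Dict.get?_insert_self _ _ _, fun he => hne he.symm, ?_, ?_, ?_⟩
      · show (if ρ pv = y then pv else ρ pv) = (if ρ y = y then pv else ρ y)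
        rw [if_neg hc, if_pos hy, hpv.2]
      · rw [PySem.Dict.get?_insert_of_ne _ _ (fun he => hne he.symm)]; exact hpv.1
      · show (if ρ pv = y then pv else ρ pv) = pv
        rw [if_neg hc, hpv.2]
    · have hyp : y ≠ pu := by intro he; rw [he, hpu.2] at hy; exact hy rfl
      rw [if_neg hy]
      refine ⟨by rw [PySem.Dict.get?_insert_of_ne _ _ hyp]; exact h1, ?_⟩
      show (if ρ y = pu then pv else ρ y) = y
      rw [if_neg hy]; exact h2
  | succ n ih =>
    intro y h
    obtain ⟨p, hp, hpne, hρp, h'⟩ := h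
    have hyp : y ≠ pu := by
      intro he; rw [he, hpu.1] at hp
      exact hpne ((Option.some.inj hp).symm.trans he.symm)
    have hIH := ih p h'
    by_cases hy : ρ y = pu
    · rw [if_pos hy]
      rw [if_pos (by rw [hρp]; exact hy)] at hIH
      refine ⟨p, by rw [PySem.Dict.get?_insert_of_ne _ _ hyp]; exact hp, hpne, ?_, hIH⟩
      simp only [hρp]
    · rw [if_neg hy]
      rw [if_neg (by rw [hρp]; exact hy)] at hIH
      refine ⟨p, by rw [PySem.Dict.get?_insert_of_ne _ _ hyp]; exact hp, hpne, ?_, hIH⟩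
      simp only [hρp]

lemma pvInv_link (V : List Int) (parent : PySem.Dict Int Int) (ρ : Int → Int)
    (pu pv : Int) (hInv : pvInv V parent ρ) (hpu : pvR parent ρ pu 0)
    (hpv : pvR parent ρ pv 0) (hne : pu ≠ pv) :
    pvInv V (parent.insert pu pv) (fun z => if ρ z = pu then pv else ρ z) := by
  constructor
  · intro z
    by_cases hz : z = pu
    · rw [hz, PySem.Dict.get?_insert_self]
      have : pu ∈ V := (hInv.1 pu).mp (by rw [hpu.1]; rfl)
      simpa using this
    · rw [PySem.Dict.get?_insert_of_ne _ _ hz]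
      exact hInv.1 z
  · intro y hy
    obtain ⟨n, hR⟩ := hInv.2 y hy
    exact ⟨_, pvR_link parent ρ pu pv hpu hpv hne n y hR⟩

-- B's relabelling sweep, pointwise
lemma pvRelabel_get (lu lv : Int) (hne : lu ≠ lv) :
    ∀ (ks : List Int) (d : PySem.Dict Int Int) (x : Int),
      (ks.foldl (fun d w => if d.get? w = some lu then d.insert w lv else d) d).get? x
        = if x ∈ ks ∧ d.get? x = some lu then some lv else d.get? x := by
  intro ks
  induction ks with
  | nil => intro d x; simp
  | cons k ks ih =>
    intro d x
    simp only [List.foldl_cons]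
    rw [ih]
    by_cases hk : d.get? k = some lu
    · rw [if_pos hk]
      by_cases hx : x = k
      · subst hx
        rw [PySem.Dict.get?_insert_self]
        have h1 : ¬ (x ∈ ks ∧ (some lv : Option Int) = some lu) := by
          rintro ⟨_, he⟩; exact hne (Option.some.inj he).symm
        rw [if_neg h1, if_pos ⟨List.mem_cons_self, hk⟩]
      · rw [PySem.Dict.get?_insert_of_ne _ _ hx]
        by_cases hm : x ∈ ks ∧ d.get? x = some lu
        · rw [if_pos hm, if_pos ⟨List.mem_cons_of_mem _ hm.1, hm.2⟩]
        · rw [if_neg hm, if_neg ?_]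
          rintro ⟨hmem, hval⟩
          rcases List.mem_cons.mp hmem with rfl | hmem'
          · exact hx rfl
          · exact hm ⟨hmem', hval⟩
    · rw [if_neg hk]
      by_cases hm : x ∈ ks ∧ d.get? x = some lu
      · rw [if_pos hm, if_pos ⟨List.mem_cons_of_mem _ hm.1, hm.2⟩]
      · rw [if_neg hm, if_neg ?_]
        rintro ⟨hmem, hval⟩
        rcases List.mem_cons.mp hmem with rfl | hmem'
        · exact hk hval
        · exact hm ⟨hmem', hval⟩

-- the relabelling sweep only overwrites existing keys
lemma pvRelabel_keys (lu lv : Int) :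
    ∀ (ks : List Int) (d : PySem.Dict Int Int),
      (ks.foldl (fun d w => if d.get? w = some lu then d.insert w lv else d) d).keys = d.keys := by
  intro ks
  induction ks with
  | nil => intro d; rfl
  | cons k ks ih =>
    intro d
    simp only [List.foldl_cons]
    rw [ih]
    by_cases hk : d.get? k = some lu
    · rw [if_pos hk]
      exact PySem.Dict.keys_insert_of_contains _ _ (by
        rw [PySem.Dict.contains_eq_isSome_get?, hk]; rfl)
    · rw [if_neg hk]

-- the coupled edge loop: A's union-find fold and B's relabelling fold decrement
-- their counters in exactly the same iterations and B's keys never change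
lemma pvLoop (V : List Int) (fuel : Nat) (hfuel : fuel = V.length + 1) :
    ∀ (es : List (Int × Int)) (parent label : PySem.Dict Int Int) (ρ ℓ : Int → Int) (cA cB : Int),
      pvInv V parent ρ →
      (∀ x, label.get? x = if x ∈ V then some (ℓ x) else none) →
      (∀ x ∈ V, ∀ y ∈ V, (ℓ x = ℓ y ↔ ρ x = ρ y)) →
      (∀ e ∈ es, e.1 ∈ V ∧ e.2 ∈ V) →
      ∃ pF cA' lF cB',
        es.foldl (fun st e => st.bind fun pc =>
            (pvUnion fuel pc.1 e.1 e.2).map fun bu =>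
              (bu.2, if bu.1 then pc.2 - 1 else pc.2)) (some (parent, cA)) = some (pF, cA') ∧
        es.foldl (fun (st : PySem.Dict Int Int × Int) e =>
            match st.1.get? e.1, st.1.get? e.2 with
            | some lu, some lv => if lu ≠ lv then (pvRelabel st.1 lu lv, st.2 - 1) else st
            | _, _ => st) (label, cB) = (lF, cB') ∧
        cA' - cA = cB' - cB ∧ lF.keys = label.keys := by
  intro es
  induction es with
  | nil =>
    intro parent label ρ ℓ cA cB _ _ _ _
    exact ⟨parent, cA, label, cB, rfl, rfl, by ring, rfl⟩
  | cons e es ih =>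
    intro parent label ρ ℓ cA cB hInv hL hC hE
    obtain ⟨hu, hv⟩ := hE e List.mem_cons_self
    have hEtail : ∀ e' ∈ es, e'.1 ∈ V ∧ e'.2 ∈ V := fun e' he' => hE e' (List.mem_cons_of_mem _ he')
    obtain ⟨nu, hRu⟩ := hInv.2 e.1 hu
    obtain ⟨parent1, hfind1, hInv1⟩ := pvFind_spec V ρ nu parent e.1 fuel hInv hRu
      (by have := pvR_bound V parent ρ hInv.1 nu e.1 hRu; omega)
    obtain ⟨nv, hRv⟩ := hInv1.2 e.2 hv
    obtain ⟨parent2, hfind2, hInv2⟩ := pvFind_spec V ρ nv parent1 e.2 fuel hInv1 hRv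
      (by have := pvR_bound V parent1 ρ hInv1.1 nv e.2 hRv; omega)
    have hlu : label.get? e.1 = some (ℓ e.1) := by rw [hL]; rw [if_pos hu]
    have hlv : label.get? e.2 = some (ℓ e.2) := by rw [hL]; rw [if_pos hv]
    have hiff := hC e.1 hu e.2 hv
    simp only [List.foldl_cons]
    by_cases hm : ρ e.1 = ρ e.2
    · -- roots equal: neither side merges
      have hleq : ℓ e.1 = ℓ e.2 := hiff.mpr hm
      have hU2 : pvUnion fuel parent e.1 e.2 = some (false, parent2) := by
        simp only [pvUnion, hfind1, Option.bind_some, hfind2, Option.map_some]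
        rw [if_neg (not_not_intro hm)]
      have hstepA : (some (parent, cA)).bind (fun pc =>
          (pvUnion fuel pc.1 e.1 e.2).map fun bu =>
            (bu.2, if bu.1 then pc.2 - 1 else pc.2)) = some (parent2, cA) := by
        simp only [Option.bind_some, hU2, Option.map_some]
        rfl
      have hstepB : (match label.get? e.1, label.get? e.2 with
          | some lu, some lv => if lu ≠ lv then (pvRelabel label lu lv, cB - 1) else (label, cB)
          | _, _ => (label, cB)) = (label, cB) := by
        rw [hlu, hlv]
        simp [hleq]
      rw [hstepA]
      have := ih parent2 label ρ ℓ cA cB hInv2 hL hC hEtail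
      obtain ⟨pF, cA', lF, cB', hA, hB, hd, hk⟩ := this
      refine ⟨pF, cA', lF, cB', hA, ?_, hd, hk⟩
      rw [hstepB]
      exact hB
    · -- roots differ: A links the roots, B relabels the whole class of e.1
      have hlne : ℓ e.1 ≠ ℓ e.2 := fun h => hm (hiff.mp h)
      have hpu : pvR parent2 ρ (ρ e.1) 0 := by
        obtain ⟨n2, hR2⟩ := hInv2.2 e.1 hu
        exact pvR_root parent2 ρ n2 e.1 hR2
      have hpv : pvR parent2 ρ (ρ e.2) 0 := by
        obtain ⟨n2, hR2⟩ := hInv2.2 e.2 hv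
        exact pvR_root parent2 ρ n2 e.2 hR2
      have hInv3 := pvInv_link V parent2 ρ (ρ e.1) (ρ e.2) hInv2 hpu hpv hm
      have hL' : ∀ x, (pvRelabel label (ℓ e.1) (ℓ e.2)).get? x =
          if x ∈ V then some (if ℓ x = ℓ e.1 then ℓ e.2 else ℓ x) else none := by
        intro x
        rw [pvRelabel, pvRelabel_get _ _ hlne]
        by_cases hx : x ∈ V
        · rw [hL x, if_pos hx]
          by_cases hxl : ℓ x = ℓ e.1
          · have hmk : x ∈ label.keys := by
              rw [← PySem.Dict.contains_iff_mem_keys, PySem.Dict.contains_eq_isSome_get?, hL x, if_pos hx]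
              rfl
            rw [if_pos ⟨hmk, by rw [hxl]⟩, if_pos hx, if_pos hxl]
          · rw [if_neg (by rintro ⟨_, hc⟩; exact hxl (Option.some.inj hc)), if_pos hx, if_neg hxl]
        · rw [hL x, if_neg hx, if_neg (by rintro ⟨_, hc⟩; cases hc), if_neg hx]
      have hC' : ∀ x ∈ V, ∀ y ∈ V,
          ((if ℓ x = ℓ e.1 then ℓ e.2 else ℓ x) = (if ℓ y = ℓ e.1 then ℓ e.2 else ℓ y) ↔
           (if ρ x = ρ e.1 then ρ e.2 else ρ x) = (if ρ y = ρ e.1 then ρ e.2 else ρ y)) := by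
        intro x hx y hy
        have hxy := hC x hx y hy
        have hxu := hC x hx e.1 hu
        have hyu := hC y hy e.1 hu
        have hvy := hC e.2 hv y hy
        have hxv := hC x hx e.2 hv
        by_cases h1 : ρ x = ρ e.1 <;> by_cases h2 : ρ y = ρ e.1
        · rw [if_pos h1, if_pos h2, if_pos (hxu.mpr h1), if_pos (hyu.mpr h2)]
          simp
        · rw [if_pos h1, if_neg h2, if_pos (hxu.mpr h1), if_neg (fun h => h2 (hyu.mp h))]
          exact hvy
        · rw [if_neg h1, if_pos h2, if_neg (fun h => h1 (hxu.mp h)), if_pos (hyu.mpr h2)]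
          exact hxv
        · rw [if_neg h1, if_neg h2, if_neg (fun h => h1 (hxu.mp h)), if_neg (fun h => h2 (hyu.mp h))]
          exact hxy
      have hU2 : pvUnion fuel parent e.1 e.2 = some (true, parent2.insert (ρ e.1) (ρ e.2)) := by
        simp only [pvUnion, hfind1, Option.bind_some, hfind2, Option.map_some]
        rw [if_pos hm]
      have hstepA : (some (parent, cA)).bind (fun pc =>
          (pvUnion fuel pc.1 e.1 e.2).map fun bu =>
            (bu.2, if bu.1 then pc.2 - 1 else pc.2)) =
          some (parent2.insert (ρ e.1) (ρ e.2), cA - 1) := by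
        simp only [Option.bind_some, hU2, Option.map_some]
        rfl
      have hstepB : (match label.get? e.1, label.get? e.2 with
          | some lu, some lv => if lu ≠ lv then (pvRelabel label lu lv, cB - 1) else (label, cB)
          | _, _ => (label, cB)) = (pvRelabel label (ℓ e.1) (ℓ e.2), cB - 1) := by
        rw [hlu, hlv]
        simp [hlne]
      rw [hstepA]
      have := ih (parent2.insert (ρ e.1) (ρ e.2)) (pvRelabel label (ℓ e.1) (ℓ e.2))
        (fun z => if ρ z = ρ e.1 then ρ e.2 else ρ z)
        (fun z => if ℓ z = ℓ e.1 then ℓ e.2 else ℓ z)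
        (cA - 1) (cB - 1) hInv3 hL' hC' hEtail
      obtain ⟨pF, cA', lF, cB', hA, hB, hd, hk⟩ := this
      refine ⟨pF, cA', lF, cB', hA, ?_, by omega, ?_⟩
      · rw [hstepB]
        exact hB
      · rw [hk, pvRelabel, pvRelabel_keys]

-- the shared initial dictionary {v: v for v in vertices}
lemma pvInit_get :
    ∀ (vs : List Int) (d : PySem.Dict Int Int) (x : Int),
      (vs.foldl (fun d v => d.insert v v) d).get? x = if x ∈ vs then some x else d.get? x := by
  intro vs
  induction vs with
  | nil => intro d x; simp
  | cons v tl ih =>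
    intro d x
    simp only [List.foldl_cons]
    rw [ih]
    by_cases hx : x ∈ tl
    · rw [if_pos hx, if_pos (List.mem_cons_of_mem _ hx)]
    · rw [if_neg hx]
      by_cases hv : x = v
      · rw [if_pos (by rw [hv]; exact List.mem_cons_self)]
        rw [hv, PySem.Dict.get?_insert_self]
      · rw [PySem.Dict.get?_insert_of_ne _ _ hv, if_neg (by
          intro hc
          rcases List.mem_cons.mp hc with rfl | h
          · exact hv rfl
          · exact hx h)]

-- ===== VERDICT (by name: the statement is the Claim_ definition above) =====
theorem compute_beta1_graph_spec : Claim_equal_compute_beta1_graph := by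
  intro vertices edges _ hPre
  unfold Spec_compute_beta1_graph
  by_cases hV : vertices = []
  · simp [compute_beta1_graph, compute_beta1_graph_alt, hV]
  · have hE : ∀ e ∈ edges, e.1 ∈ vertices ∧ e.2 ∈ vertices := hPre.resolve_left hV
    simp only [compute_beta1_graph, compute_beta1_graph_alt, if_neg hV]
    have hInv0 : pvInv vertices (vertices.foldl (fun d v => d.insert v v) PySem.Dict.empty) (fun z => z) := by
      constructor
      · intro x
        rw [pvInit_get]
        by_cases hx : x ∈ vertices
        · rw [if_pos hx]; simpa using hx
        · rw [if_neg hx]; simpa [PySem.Dict.get?_empty] using hx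
      · intro x hx
        exact ⟨0, ⟨by rw [pvInit_get, if_pos hx], rfl⟩⟩
    have hL0 : ∀ x, (vertices.foldl (fun d v => d.insert v v) PySem.Dict.empty).get? x =
        if x ∈ vertices then some ((fun z => z) x) else none := by
      intro x
      rw [pvInit_get]
      by_cases hx : x ∈ vertices
      · rw [if_pos hx, if_pos hx]
      · rw [if_neg hx, if_neg hx, PySem.Dict.get?_empty]
    obtain ⟨pF, cA', lF, cB', hA, hB, hd, hk⟩ :=
      pvLoop vertices (vertices.length + 1) rfl edges
        (vertices.foldl (fun d v => d.insert v v) PySem.Dict.empty)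
        (vertices.foldl (fun d v => d.insert v v) PySem.Dict.empty)
        (fun z => z) (fun z => z) (vertices.length : Int)
        (((vertices.foldl (fun d v => d.insert v v) PySem.Dict.empty).size : Int))
        hInv0 hL0 (fun x _ y _ => Iff.rfl) hE
    simp only [hA, hB]
    have hsz : lF.size = (vertices.foldl (fun d v => d.insert v v) PySem.Dict.empty).size := by
      have := congrArg List.length hk
      simpa [PySem.Dict.keys, PySem.Dict.size] using this
    rw [hsz]
    omega
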